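-- pv_equiv track=rewrite | github.com/bilmak/python_core | final_task4.py | split_by_index
-- ===== SOURCE A (Python) =====
-- def split_by_index(data: str, args: list[int]) -> list[str]:
--     result: list = []
--     word: str = ""
--     for k, v in enumerate(data, start=1):
--         word += v
--         if k in args:
--             result.append(word)
--             word = ""
--     if word:
--         result.append(word)
--         word = ""
--     return result
-- ===== SOURCE B (Python) =====
-- def split_by_index(data: str, args: list[int]) -> list[str]:
--     cuts = sorted({p for p in args if 0 < p <= len(data)})
--     chunks = []
--     prev = 0
--     for c in cuts:
--         chunks.append(data[prev:c])
--         prev = c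
--     if prev < len(data):
--         chunks.append(data[prev:])
--     return chunks
-- ===== Notes on version B (the rewrite author's own statement) =====
-- stated objective: faster
-- what changed: Instead of scanning the string character by character with a membership test on args at every position, B precomputes the sorted deduplicated in-range cut positions once and builds the chunks by slicing between consecutive cuts.
import Mathlib
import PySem

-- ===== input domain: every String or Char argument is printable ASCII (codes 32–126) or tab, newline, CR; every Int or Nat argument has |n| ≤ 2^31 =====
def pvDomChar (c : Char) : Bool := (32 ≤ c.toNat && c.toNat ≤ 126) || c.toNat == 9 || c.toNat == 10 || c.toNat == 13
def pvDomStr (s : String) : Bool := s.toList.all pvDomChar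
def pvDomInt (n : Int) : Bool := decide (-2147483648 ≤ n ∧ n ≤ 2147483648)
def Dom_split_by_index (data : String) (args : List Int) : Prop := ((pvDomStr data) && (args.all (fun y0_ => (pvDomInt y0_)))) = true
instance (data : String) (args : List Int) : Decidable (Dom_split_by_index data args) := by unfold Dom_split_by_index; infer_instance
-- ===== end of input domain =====

-- B replaces A's per-character scan (membership test on args at every position) by a
-- sort-then-slice pass over the precomputed deduplicated in-range cut positions (objective: alternative).

-- ===== PORT A =====
-- loop body: word += v; if k in args: append word, reset (the running word is a List Char; Python str concat)
def pvStepA (args : List Int) (st : List String × List Char) (kv : Int × Char) : List String × List Char :=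
  let word := st.2 ++ [kv.2]
  if kv.1 ∈ args then (st.1 ++ [String.ofList word], []) else (st.1, word)

-- after the loop: if word: result.append(word)
def pvFinishA (st : List String × List Char) : List String :=
  if st.2 ≠ [] then st.1 ++ [String.ofList st.2] else st.1

def split_by_index (data : String) (args : List Int) : List String :=
  pvFinishA ((PySem.List.enumerate data.toList 1).foldl (pvStepA args) ([], []))

-- ===== PORT B =====
-- loop body: chunks.append(data[prev:c]); prev = c
def pvStepB (data : String) (st : List String × Int) (c : Int) : List String × Int :=
  (st.1 ++ [PySem.Str.slice data (some st.2) (some c)], c)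

-- after the loop: if prev < len(data): chunks.append(data[prev:])
def pvFinishB (data : String) (st : List String × Int) : List String :=
  if st.2 < PySem.Str.len data then st.1 ++ [PySem.Str.slice data (some st.2) none] else st.1

def split_by_index_alt (data : String) (args : List Int) : List String :=
  pvFinishB data
    ((PySem.List.sorted (PySem.Set.ofList (args.filter (fun p => 0 < p && p ≤ PySem.Str.len data))) (fun x => x) false).foldl
      (pvStepB data) ([], 0))

-- ===== PRECONDITION & SPEC =====
def Spec_split_by_index (data : String) (args : List Int) (out : List String) : Prop := out = split_by_index_alt data args
instance (data : String) (args : List Int) (out : List String) : Decidable (Spec_split_by_index data args out) := by unfold Spec_split_by_index; infer_instance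

-- ===== CLAIM (what is proved, stated in full; the proofs are below) =====
def Claim_equal_split_by_index : Prop := ∀ (data : String) (args : List Int), Dom_split_by_index data args → Spec_split_by_index data args (split_by_index data args)

-- ===== LEMMAS AND PROOFS =====

-- A's scan as a structural recursion: position s, running word w
def pvScan (args : List Int) : List Char → Int → List Char → List (List Char)
  | [], _, w => if w ≠ [] then [w] else []
  | c :: cs, s, w =>
      if s ∈ args then (w ++ [c]) :: pvScan args cs (s + 1) []
      else pvScan args cs (s + 1) (w ++ [c])

-- B's chunks: slices of the full list between consecutive cut positions
def pvSegs (full : List Char) : List Int → Int → List (List Char)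
  | [], p => if p < (full.length : Int) then [full.drop p.toNat] else []
  | c :: L, p => (full.drop p.toNat).take (c.toNat - p.toNat) :: pvSegs full L c

lemma pvA_fold (args : List Int) (cs : List Char) (s : Int) (w : List Char) (res : List String) :
    pvFinishA ((PySem.List.enumerate cs s).foldl (pvStepA args) (res, w))
      = res ++ (pvScan args cs s w).map String.ofList := by
  induction cs generalizing s w res with
  | nil =>
    by_cases hw : w = [] <;>
      simp [PySem.List.enumerate_nil, pvFinishA, pvScan, hw]
  | cons x cs ih =>
    rw [PySem.List.enumerate_cons, List.foldl_cons]
    by_cases hc : s ∈ args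
    · rw [show pvStepA args (res, w) (s, x) = (res ++ [String.ofList (w ++ [x])], []) from by
        simp [pvStepA, hc]]
      rw [ih]
      simp [pvScan, hc]
    · rw [show pvStepA args (res, w) (s, x) = (res, w ++ [x]) from by simp [pvStepA, hc]]
      rw [ih]
      simp [pvScan, hc]

lemma pvB_fold (data : String) (L : List Int) (prev : Int) (chunks : List String)
    (hprev : 0 ≤ prev) (hL : ∀ c ∈ L, 0 ≤ c) :
    pvFinishB data (L.foldl (pvStepB data) (chunks, prev))
      = chunks ++ (pvSegs data.toList L prev).map String.ofList := by
  induction L generalizing prev chunks with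
  | nil =>
    simp only [List.foldl_nil, pvFinishB, pvSegs, PySem.Str.len_eq]
    by_cases h : prev < (data.toList.length : Int)
    · rw [if_pos h, if_pos h]
      simp [PySem.Str.slice, PySem.List.slice_from _ hprev]
    · rw [if_neg h, if_neg h]
      simp
  | cons c L ih =>
    have hc0 : (0 : Int) ≤ c := hL c (by simp)
    rw [List.foldl_cons,
      show pvStepB data (chunks, prev) c
          = (chunks ++ [PySem.Str.slice data (some prev) (some c)], c) from rfl,
      ih c _ hc0 (fun x hx => hL x (by simp [hx]))]
    simp [pvSegs, PySem.Str.slice, PySem.List.slice_toNat _ hprev hc0]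

lemma pvScan_nocut (args : List Int) (cs : List Char) (s : Int) (w : List Char)
    (h : ∀ k : Int, s ≤ k → k < s + cs.length → k ∉ args) :
    pvScan args cs s w = if (w ++ cs) ≠ [] then [w ++ cs] else [] := by
  induction cs generalizing s w with
  | nil => simp [pvScan]
  | cons c cs ih =>
    have hs : s ∉ args := h s le_rfl (by simp only [List.length_cons]; omega)
    rw [pvScan, if_neg hs,
      ih (s + 1) (w ++ [c]) (fun k h1 h2 => h k (by omega) (by
        simp only [List.length_cons]
        omega))]
    simp

lemma pvScan_cut (args : List Int) (cs : List Char) (s : Int) (w : List Char) (c : Int)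
    (h1 : s ≤ c) (h2 : c < s + cs.length)
    (h3 : ∀ k : Int, s ≤ k → k < c → k ∉ args) (h4 : c ∈ args) :
    pvScan args cs s w
      = (w ++ cs.take (c - s + 1).toNat) :: pvScan args (cs.drop (c - s + 1).toNat) (c + 1) [] := by
  induction cs generalizing s w with
  | nil => simp only [List.length_nil] at h2; omega
  | cons x cs ih =>
    by_cases hsc : s = c
    · have h1t : (c - s + 1).toNat = 1 := by omega
      rw [pvScan, if_pos (by rw [hsc]; exact h4), h1t, hsc]
      simp
    · have hs : s ∉ args := h3 s le_rfl (by omega)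
      have ht : (c - s + 1).toNat = (c - (s + 1) + 1).toNat + 1 := by omega
      rw [pvScan, if_neg hs,
        ih (s + 1) (w ++ [x]) (by omega)
          (by simp only [List.length_cons] at h2; omega)
          (fun k hk1 hk2 => h3 k (by omega) hk2),
        ht, List.take_succ_cons, List.drop_succ_cons]
      simp

lemma pvMain (args : List Int) (full : List Char) (L : List Int) (p : Int)
    (hp : 0 ≤ p) (hpw : L.Pairwise (· < ·))
    (hmem : ∀ k : Int, p < k → k ≤ full.length → ((k ∈ args) ↔ k ∈ L))
    (hbd : ∀ c ∈ L, p < c ∧ c ≤ full.length) :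
    pvScan args (full.drop p.toNat) (p + 1) [] = pvSegs full L p := by
  induction L generalizing p with
  | nil =>
    have hd : (full.drop p.toNat).length = full.length - p.toNat := List.length_drop
    rw [pvScan_nocut args _ _ _ (fun k hk1 hk2 => by
      rw [hd] at hk2
      intro hka
      simpa using (hmem k (by omega) (by omega)).mp hka)]
    rw [pvSegs]
    by_cases h : p < (full.length : Int)
    · have hne : full.drop p.toNat ≠ [] := by
        rw [ne_eq, List.drop_eq_nil_iff]
        omega
      rw [if_pos (by simpa using hne), if_pos h]
      simp
    · have hnil : full.drop p.toNat = [] := List.drop_eq_nil_of_le (by omega)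
      rw [hnil, if_neg h]
      simp
  | cons c L ih =>
    obtain ⟨hpc, hcn⟩ := hbd c (by simp)
    have hLgt : ∀ x ∈ L, c < x := fun x hx => (List.pairwise_cons.mp hpw).1 x hx
    have hlen : ((full.drop p.toNat).length : Int) = (full.length : Int) - p := by
      rw [List.length_drop]
      omega
    rw [pvScan_cut args _ _ _ c (by omega) (by omega)
      (fun k hk1 hk2 => by
        intro hka
        have hm := (hmem k (by omega) (by omega)).mp hka
        rw [List.mem_cons] at hm
        rcases hm with h | h
        · omega
        · exact absurd (hLgt k h) (by omega))
      ((hmem c (by omega) (by omega)).mpr (List.mem_cons_self))]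
    have e1 : (c - (p + 1) + 1).toNat = c.toNat - p.toNat := by omega
    have e2 : (full.drop p.toNat).drop (c.toNat - p.toNat) = full.drop c.toNat := by
      rw [List.drop_drop]
      congr 1
      omega
    rw [pvSegs, e1, e2,
      ih c (by omega) (List.pairwise_cons.mp hpw).2
        (fun k hk1 hk2 => by
          rw [hmem k (by omega) hk2, List.mem_cons]
          constructor
          · rintro (rfl | h)
            · exact absurd hk1 (lt_irrefl _)
            · exact h
          · exact Or.inr)
        (fun x hx => ⟨hLgt x hx, (hbd x (List.mem_cons_of_mem _ hx)).2⟩)]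
    simp

lemma pvCuts_pairwise (args : List Int) (n : Int) :
    (PySem.List.sorted (PySem.Set.ofList (args.filter (fun p => 0 < p && p ≤ n))) (fun x => x) false).Pairwise (· < ·) :=
  PySem.List.sorted_ofList_pairwise_lt _

lemma pvCuts_mem (args : List Int) (n : Int) (k : Int) :
    k ∈ PySem.List.sorted (PySem.Set.ofList (args.filter (fun p => 0 < p && p ≤ n))) (fun x => x) false
      ↔ (0 < k ∧ k ≤ n ∧ k ∈ args) := by
  rw [PySem.List.mem_sorted, PySem.Set.mem_ofList, List.mem_filter]
  simp only [Bool.and_eq_true, decide_eq_true_eq]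
  tauto

-- ===== VERDICT (by name: the statement is the Claim_ definition above) =====
theorem split_by_index_spec : Claim_equal_split_by_index := by
  intro data args _
  unfold Spec_split_by_index split_by_index split_by_index_alt
  rw [pvA_fold args data.toList 1 [] [],
    pvB_fold data _ 0 [] le_rfl
      (fun c hc => le_of_lt ((pvCuts_mem args (PySem.Str.len data) c).mp hc).1),
    List.nil_append, List.nil_append]
  congr 1
  have hm := pvMain args data.toList
    (PySem.List.sorted (PySem.Set.ofList (args.filter (fun p => 0 < p && p ≤ PySem.Str.len data))) (fun x => x) false)
    0 le_rfl (pvCuts_pairwise args _)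
    (fun k hk1 hk2 => by
      rw [pvCuts_mem args (PySem.Str.len data) k, PySem.Str.len_eq]
      exact ⟨fun h => ⟨hk1, hk2, h⟩, fun h => h.2.2⟩)
    (fun c hc => by
      have h := (pvCuts_mem args (PySem.Str.len data) c).mp hc
      rw [PySem.Str.len_eq] at h
      exact ⟨h.1, h.2.1⟩)
  simpa using hm
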